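-- pv_equiv track=rewrite | github.com/kagandikmen/advent-of-fpga-2025 | test/day01/ref.py | turn_knob
-- ===== SOURCE A (Python) =====
-- from typing import Tuple
--
-- def turn_knob(status: int, value: int) -> Tuple[int, int]:
--
--     turn_right = value >= 0
--     turn_abs = abs(value)
--     q = turn_abs // 100
--     r = turn_abs % 100
--
--     for _ in range(r):
--         if turn_right:
--             status += 1
--         else:
--             status -= 1
--
--         if (status == 0) or (status == 100):
--             q += 1
--
--     pos_final = status % 100
--
--     return pos_final, q
-- ===== SOURCE B (Python) =====
-- def turn_knob(status, value):
--     q, r = divmod(abs(value), 100)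
--     if value >= 0:
--         final = status + r
--         hit = (status < 0 <= final) or (status < 100 <= final)
--     else:
--         final = status - r
--         hit = (final <= 0 < status) or (final <= 100 < status)
--     return final % 100, q + (1 if hit else 0)
-- ===== Notes on version B (the rewrite author's own statement) =====
-- stated objective: simpler
-- what changed: Replaces the step-by-step simulation loop over r positions with a closed-form computation: the final position is status +/- r and a boundary crossing (at most one, since r<100) is detected by half-open interval inequalities.
import Mathlib
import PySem

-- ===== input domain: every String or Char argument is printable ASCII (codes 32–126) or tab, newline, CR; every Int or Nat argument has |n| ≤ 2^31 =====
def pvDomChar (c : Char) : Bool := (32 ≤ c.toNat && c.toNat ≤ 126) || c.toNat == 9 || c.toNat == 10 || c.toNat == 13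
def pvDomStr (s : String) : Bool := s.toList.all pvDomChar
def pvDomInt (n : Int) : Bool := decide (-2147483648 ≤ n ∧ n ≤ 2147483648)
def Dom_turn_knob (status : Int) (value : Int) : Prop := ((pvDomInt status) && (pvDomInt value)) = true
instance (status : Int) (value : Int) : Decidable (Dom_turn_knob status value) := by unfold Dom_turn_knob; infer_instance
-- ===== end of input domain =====

-- B replaces A's per-step simulation loop with a closed-form computation of the final position and a half-open interval test for the single possible boundary crossing (objective: simpler).


-- ===== PORT A =====
-- loop body of A: repeat r times, step status by +-1, count hits of 0 or 100
def turnLoop (right : Bool) : Nat → Int → Int → Int × Int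
  | 0, st, q => (st, q)
  | Nat.succ n, st, q =>
      let st' := if right then st + 1 else st - 1
      let q'  := if st' = 0 ∨ st' = 100 then q + 1 else q
      turnLoop right n st' q'

def turn_knob (status : Int) (value : Int) : Int × Int :=
  let turn_right := decide (value ≥ 0)
  let turn_abs := |value|
  let q := PySem.Int.floordiv turn_abs 100
  let r := PySem.Int.mod turn_abs 100
  let p := turnLoop turn_right r.toNat status q
  (PySem.Int.mod p.1 100, p.2)

-- ===== PORT B =====
def turn_knob_alt (status : Int) (value : Int) : Int × Int :=
  let q := PySem.Int.floordiv |value| 100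
  let r := PySem.Int.mod |value| 100
  if value ≥ 0 then
    let final := status + r
    let hit := (status < 0 ∧ 0 ≤ final) ∨ (status < 100 ∧ 100 ≤ final)
    (PySem.Int.mod final 100, q + if hit then 1 else 0)
  else
    let final := status - r
    let hit := (final ≤ 0 ∧ 0 < status) ∨ (final ≤ 100 ∧ 100 < status)
    (PySem.Int.mod final 100, q + if hit then 1 else 0)

-- ===== PRECONDITION & SPEC =====
def Spec_turn_knob (status : Int) (value : Int) (out : Int × Int) : Prop := out = turn_knob_alt status value
instance (status : Int) (value : Int) (out : Int × Int) : Decidable (Spec_turn_knob status value out) := by unfold Spec_turn_knob; infer_instance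

-- ===== CLAIM (what is proved, stated in full; the proofs are below) =====
def Claim_equal_turn_knob : Prop := ∀ (status : Int) (value : Int), Dom_turn_knob status value → Spec_turn_knob status value (turn_knob status value)

-- ===== LEMMAS AND PROOFS =====

theorem turnLoop_right (n : Nat) (st q : Int) :
    turnLoop true n st q =
      (st + n, q + (if st < 0 ∧ 0 ≤ st + n then 1 else 0)
                 + (if st < 100 ∧ 100 ≤ st + n then 1 else 0)) := by
  induction n generalizing st q with
  | zero =>
    simp only [turnLoop, Prod.mk.injEq, Nat.cast_zero]
    constructor
    · omega
    · split_ifs <;> omega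
  | succ n ih =>
    simp only [turnLoop, ih, Prod.mk.injEq]
    push_cast
    constructor
    · ring
    · split_ifs <;> omega

theorem turnLoop_left (n : Nat) (st q : Int) :
    turnLoop false n st q =
      (st - n, q + (if st - n ≤ 0 ∧ 0 < st then 1 else 0)
                 + (if st - n ≤ 100 ∧ 100 < st then 1 else 0)) := by
  induction n generalizing st q with
  | zero =>
    simp only [turnLoop, Prod.mk.injEq, Nat.cast_zero]
    constructor
    · omega
    · split_ifs <;> omega
  | succ n ih =>
    simp only [turnLoop, ih, Prod.mk.injEq]
    push_cast
    constructor
    · ring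
    · split_ifs <;> omega

-- ===== VERDICT (by name: the statement is the Claim_ definition above) =====
theorem turn_knob_spec : Claim_equal_turn_knob := by
  intro status value _
  unfold Spec_turn_knob turn_knob turn_knob_alt
  have h100 : (0:Int) < 100 := by norm_num
  have hm := PySem.Int.mod_eq_emod_of_pos (a := |value|) h100
  have hr0 : 0 ≤ PySem.Int.mod |value| 100 := by
    rw [hm]; exact Int.emod_nonneg _ (by norm_num)
  have hr99 : PySem.Int.mod |value| 100 < 100 := by
    rw [hm]; exact Int.emod_lt_of_pos _ h100
  have hcast : ((PySem.Int.mod |value| 100).toNat : Int) = PySem.Int.mod |value| 100 :=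
    Int.toNat_of_nonneg hr0
  by_cases hv : value ≥ 0
  · simp only [show decide (value ≥ 0) = true from by simp [hv], if_pos hv,
      turnLoop_right, hcast, Prod.mk.injEq]
    exact ⟨trivial, by split_ifs <;> omega⟩
  · simp only [show decide (value ≥ 0) = false from by simpa using hv , if_neg hv,
      turnLoop_left, hcast, Prod.mk.injEq]
    exact ⟨trivial, by split_ifs <;> omega⟩
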